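-- pv_equiv track=rewrite | github.com/evank28/ContestCoding | RBC_hackerrank/Practice/Actual/kdifference.1.py | kDifference
-- ===== SOURCE A (Python) =====
-- def kDifference(a, k):
--     a.sort()
--     count=0
--     l = len(a)
--     for i in range(l):
--         sub=i+1
--         while sub<l and a[sub]<=a[i]+2:
--             if a[sub]==a[i]+2:
--                 count+=1
--             sub+=1
--     return count
-- ===== SOURCE B (Python) =====
-- # B: one-pass frequency dict, then sum cnt[v]*cnt[v+2] over distinct values.
-- # Note: A sorts its argument in place; B does not mutate it (equivalence is about the return value).
-- def kDifference(a, k):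
--     cnt = {}
--     for x in a:
--         cnt[x] = cnt.get(x, 0) + 1
--     return sum(c * cnt.get(v + 2, 0) for v, c in cnt.items())
-- ===== Notes on version B (the rewrite author's own statement) =====
-- stated objective: faster
-- what changed: Replaces A's sort plus nested index scan with a single-pass frequency dictionary and a sum of cnt[v]*cnt[v+2] over distinct values (k is unused in A and stays unused).
import Mathlib
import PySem

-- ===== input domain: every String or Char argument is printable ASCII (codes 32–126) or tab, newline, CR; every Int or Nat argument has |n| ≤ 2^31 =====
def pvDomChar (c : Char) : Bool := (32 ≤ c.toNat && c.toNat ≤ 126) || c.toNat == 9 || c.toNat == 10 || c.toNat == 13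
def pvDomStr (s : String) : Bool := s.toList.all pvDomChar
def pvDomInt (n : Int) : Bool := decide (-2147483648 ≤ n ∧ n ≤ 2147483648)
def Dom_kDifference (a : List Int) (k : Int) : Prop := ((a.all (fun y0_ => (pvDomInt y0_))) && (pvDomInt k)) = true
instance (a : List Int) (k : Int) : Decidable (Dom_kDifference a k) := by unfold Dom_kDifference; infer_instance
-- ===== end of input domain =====

-- B replaces A's sort + nested index scan by a one-pass frequency dictionary (asymptotically faster).
-- A sorts its argument in place (B does not); the equivalence proved here is about the RETURN value only.
-- Both A and B ignore the parameter k (A hard-codes the difference 2).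

-- ===== PORT A =====
-- inner 'while sub < l and a[sub] <= a[i] + 2' loop of A; indices stay in range, so pyGetD is exact
def kDiffWhile (s : List Int) (l : Int) (ai : Int) (sub : Int) (count : Int) : Int :=
  if sub < l then
    if PySem.List.pyGetD s sub 0 ≤ ai + 2 then
      kDiffWhile s l ai (sub + 1)
        (if PySem.List.pyGetD s sub 0 = ai + 2 then count + 1 else count)
    else count
  else count
termination_by (l - sub).toNat
decreasing_by omega

def kDifference (a : List Int) (k : Int) : Int :=
  let s := PySem.List.sorted a (fun x => x) false
  let l : Int := s.length
  (PySem.List.pyRange 0 l 1).foldl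
    (fun count i => kDiffWhile s l (PySem.List.pyGetD s i 0) (i + 1) count) 0

-- ===== PORT B =====
def kDifference_alt (a : List Int) (k : Int) : Int :=
  let cnt := a.foldl (fun d x => d.insert x (d.getD x 0 + 1)) (PySem.Dict.empty : PySem.Dict Int Int)
  ((cnt.items).map (fun p => p.2 * cnt.getD (p.1 + 2) 0)).sum

-- ===== PRECONDITION & SPEC =====
def Spec_kDifference (a : List Int) (k : Int) (out : Int) : Prop := out = kDifference_alt a k
instance (a : List Int) (k : Int) (out : Int) : Decidable (Spec_kDifference a k out) := by unfold Spec_kDifference; infer_instance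

-- ===== CLAIM (what is proved, stated in full; the proofs are below) =====
def Claim_equal_kDifference : Prop := ∀ (a : List Int) (k : Int), Dom_kDifference a k → Spec_kDifference a k (kDifference a k)

-- ===== LEMMAS AND PROOFS =====

-- A's inner while loop on a sorted list adds the number of occurrences of ai+2 in the suffix from sub.
lemma kDiffWhile_eq_count (s : List Int) (hs : s.Pairwise (· ≤ ·)) (ai : Int) :
    ∀ (n : Nat) (sub : Int), 0 ≤ sub → s.length - sub.toNat ≤ n → ∀ count,
      kDiffWhile s (s.length : Int) ai sub count
        = count + ((s.drop sub.toNat).count (ai + 2) : Int) := by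
  intro n
  induction n with
  | zero =>
    intro sub h0 hn count
    have hge : s.length ≤ sub.toNat := by omega
    have hnlt : ¬ sub < (s.length : Int) := by omega
    rw [kDiffWhile, if_neg hnlt, List.drop_eq_nil_of_le hge]
    simp
  | succ n ih =>
    intro sub h0 hn count
    by_cases hlt : sub < (s.length : Int)
    swap
    · have hge : s.length ≤ sub.toNat := by omega
      rw [kDiffWhile, if_neg hlt, List.drop_eq_nil_of_le hge]
      simp
    · have hsl : sub.toNat < s.length := by omega
      have hget : PySem.List.pyGetD s sub 0 = s[sub.toNat] :=
        PySem.List.pyGetD_eq_getElem s (0:Int) h0 hlt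
      have hdrop : s.drop sub.toNat = s[sub.toNat] :: s.drop (sub.toNat + 1) :=
        List.drop_eq_getElem_cons hsl
      by_cases hle : s[sub.toNat] ≤ ai + 2
      · rw [kDiffWhile, if_pos hlt, hget, if_pos hle]
        have h1 : (0:Int) ≤ sub + 1 := by omega
        have h2 : s.length - (sub+1).toNat ≤ n := by omega
        rw [ih (sub+1) h1 h2]
        have ht : (sub+1).toNat = sub.toNat + 1 := by omega
        rw [ht, hdrop, List.count_cons]
        by_cases heq : s[sub.toNat] = ai + 2
        · simp only [heq]
          simp; ring
        · simp [heq]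
      · rw [kDiffWhile, if_pos hlt, hget, if_neg hle]
        have hzero : (s.drop sub.toNat).count (ai + 2) = 0 := by
          rw [List.count_eq_zero]
          intro hmem
          rcases List.mem_iff_getElem.mp hmem with ⟨j, hj, hje⟩
          have hjs : (s.drop sub.toNat)[j] = s[sub.toNat + j]'(by
              have := List.length_drop (l := s) (i := sub.toNat); omega) := by
            simp [List.getElem_drop]
          have hmono : s[sub.toNat] ≤ s[sub.toNat + j]'(by
              have := List.length_drop (l := s) (i := sub.toNat); omega) := by
            rcases Nat.eq_zero_or_pos j with hj0 | hjpos
            · subst hj0; simp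
            · exact (List.pairwise_iff_getElem.mp hs) _ _ _ _ (by omega)
          omega
        rw [hzero]
        simp

-- on a sorted list, all occurrences of s[i]+2 sit strictly after position i
lemma drop_count_full (s : List Int) (hs : s.Pairwise (· ≤ ·)) (i : Nat) (hi : i < s.length) :
    ((s.drop (i + 1)).count (s[i] + 2) : Int) = (s.count (s[i] + 2) : Int) := by
  obtain ⟨v, hv⟩ : ∃ v, v = s[i] + 2 := ⟨_, rfl⟩
  rw [← hv]
  have hsplit : (s.take (i+1)).count v = 0 := by
    rw [List.count_eq_zero]
    intro hmem
    subst hv; rcases List.mem_iff_getElem.mp hmem with ⟨j, hj, hje⟩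
    have hjlen : j < s.length := by
      have := List.length_take (l := s) (i := i+1); omega
    have hget : (s.take (i+1))[j] = s[j] := List.getElem_take
    have hji : j ≤ i := by
      have := List.length_take (l := s) (i := i+1); omega
    have hmono : s[j] ≤ s[i] := by
      rcases Nat.lt_or_ge j i with h | h
      · exact (List.pairwise_iff_getElem.mp hs) _ _ _ _ h
      · have : j = i := by omega
        subst this; rfl
    omega
  have : s.count v = (s.take (i+1)).count v + (s.drop (i+1)).count v := by
    conv_lhs => rw [← List.take_append_drop (i+1) s]
    exact List.count_append ..
  omega

lemma sum_map_ite_self (D : List Int) (hD : D.Nodup) (x : Int) (hx : x ∈ D) (g : Int → Int) :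
    (D.map (fun v => if v = x then g v else 0)).sum = g x := by
  induction D with
  | nil => simp at hx
  | cons d rest ih =>
    rcases List.nodup_cons.mp hD with ⟨hdn, hrn⟩
    by_cases hdx : d = x
    · subst hdx
      have hzero : (rest.map (fun v => if v = d then g v else 0)).sum = 0 := by
        apply List.sum_eq_zero
        intro y hy
        rcases List.mem_map.mp hy with ⟨v, hv, rfl⟩
        have : v ≠ d := fun h => hdn (h ▸ hv)
        simp [this]
      simp [hzero]
    · have hxr : x ∈ rest := by
        rcases List.mem_cons.mp hx with h | h
        · exact absurd h.symm hdx
        · exact h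
      simp [hdx, ih hrn hxr]

-- grouping by value: summing g over the list equals summing count·g over the distinct values
lemma grouped (a : List Int) (g : Int → Int) :
    ∀ (D : List Int), D.Nodup → (∀ x ∈ a, x ∈ D) →
      (D.map (fun v => (a.count v : Int) * g v)).sum = (a.map g).sum := by
  induction a with
  | nil =>
    intro D _ _
    simp
  | cons x t ih =>
    intro D hD hsub
    have hx : x ∈ D := hsub x (List.mem_cons_self ..)
    have hsub' : ∀ y ∈ t, y ∈ D := fun y hy => hsub y (List.mem_cons_of_mem _ hy)
    have hpt : ∀ v : Int, ((x :: t).count v : Int) * g v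
        = (t.count v : Int) * g v + (if v = x then g v else 0) := by
      intro v
      by_cases hvx : v = x
      · subst hvx; simp; ring
      · have hxv : ¬ x = v := fun h => hvx h.symm
        simp [hvx, hxv]
    calc (D.map (fun v => ((x :: t).count v : Int) * g v)).sum
        = (D.map (fun v => (t.count v : Int) * g v + (if v = x then g v else 0))).sum := by
          simp only [hpt]
      _ = (D.map (fun v => (t.count v : Int) * g v)).sum
            + (D.map (fun v => if v = x then g v else 0)).sum := by
          rw [← List.sum_map_add]
      _ = (t.map g).sum + g x := by
          rw [ih D hD hsub', sum_map_ite_self D hD x hx]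
      _ = ((x :: t).map g).sum := by simp; ring

-- ===== VERDICT (by name: the statement is the Claim_ definition above) =====
theorem kDifference_spec : Claim_equal_kDifference := by
  intro a k _
  unfold Spec_kDifference kDifference kDifference_alt
  simp only []
  set s := PySem.List.sorted a (fun x => x) false with hsdef
  have hpw : s.Pairwise (· ≤ ·) := PySem.List.sorted_pairwise a (fun x => x)
  have hperm : s.Perm a := PySem.List.sorted_perm a (fun x => x) false
  -- A-side: the nested loops compute Σ_{x ∈ s} count of (x+2) in s
  have hA : (PySem.List.pyRange 0 (s.length : Int) 1).foldl
      (fun count i => kDiffWhile s (s.length : Int) (PySem.List.pyGetD s i 0) (i + 1) count) 0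
      = (s.map (fun x => (s.count (x + 2) : Int))).sum := by
    rw [PySem.List.foldl_congr_mem _ _
      (fun count i => count + (s.count (PySem.List.pyGetD s i 0 + 2) : Int)) 0 ?_]
    · rw [PySem.List.foldl_pyRange_zero_pyGetD' s 0
        (fun acc x => acc + (s.count (x + 2) : Int)) 0]
      rw [PySem.List.foldl_add]
      simp
    · intro acc i hi
      rcases PySem.List.mem_pyRange_one.mp hi with ⟨h0, hlen⟩
      have hget : PySem.List.pyGetD s i 0 = s[i.toNat]'(by omega) :=
        PySem.List.pyGetD_eq_getElem s (0:Int) h0 hlen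
      rw [kDiffWhile_eq_count s hpw _ s.length (i+1) (by omega) (by omega) acc]
      have ht : (i+1).toNat = i.toNat + 1 := by omega
      rw [ht, hget, drop_count_full s hpw i.toNat (by omega)]
      simp only [hget]
  rw [hA]
  -- B-side: the dict loop is Counter, the sum groups by distinct values
  rw [PySem.Dict.foldl_insert_getD_add_one_eq_counter, PySem.Dict.items_counter, List.map_map]
  have hB : ((PySem.Set.ofList a).map
      ((fun p : Int × Int => p.2 * (PySem.Dict.counter a).getD (p.1 + 2) 0) ∘
        (fun v => (v, (a.count v : Int))))).sum
      = (a.map (fun x => (a.count (x + 2) : Int))).sum := by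
    have : ((fun p : Int × Int => p.2 * (PySem.Dict.counter a).getD (p.1 + 2) 0) ∘
        (fun v => (v, (a.count v : Int))))
        = fun v => (a.count v : Int) * (a.count (v + 2) : Int) := by
      funext v
      simp [PySem.Dict.getD_counter]
    rw [this]
    exact grouped a (fun v => (a.count (v + 2) : Int)) (PySem.Set.ofList a)
      (PySem.Set.nodup_ofList a) (fun x hx => (PySem.Set.mem_ofList a x).mpr hx)
  rw [hB]
  -- mediate: counts in s equal counts in a, and the sums are over permuted lists
  have hcnt : ∀ x : Int, s.count (x + 2) = a.count (x + 2) := fun x => hperm.count_eq _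
  calc (s.map (fun x => (s.count (x + 2) : Int))).sum
      = (s.map (fun x => (a.count (x + 2) : Int))).sum := by
        simp only [hcnt]
    _ = (a.map (fun x => (a.count (x + 2) : Int))).sum :=
        (hperm.map _).sum_eq
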